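-- pv_equiv track=rewrite | github.com/yeseul0722/Algorithm | 프로그래머스/3/43164. 여행경로/여행경로.py | solution
-- ===== SOURCE A (Python) =====
-- from collections import deque
--
-- def solution(tickets):
--     answer = []
--     tickets.sort(key = lambda x: (x[0], x[1]))
--
--     dq = deque([(["ICN"], tickets)])
--
--     while dq:
--         now_path, now_t = dq.popleft()
--
--         if len(now_t) == 0:
--             answer = now_path
--             break
--
--         valid_idx = -1
--         for i in range(len(now_t)):
--             if now_t[i][0] == now_path[-1]:
--                 valid_idx = i
--                 break
--
--         if valid_idx == -1:
--             continue
--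
--         while valid_idx < len(now_t) and now_t[valid_idx][0] == now_path[-1]:
--             dq.append((now_path + [now_t[valid_idx][1]], now_t[:valid_idx] + now_t[valid_idx+1:]))
--
--             valid_idx += 1
--
--     return answer
-- ===== SOURCE B (Python) =====
-- def solution(tickets):
--     ts = sorted(tickets, key=lambda x: (x[0], x[1]))
--
--     def dfs(node, remaining):
--         # returns the lexicographically first tail of destinations using all
--         # remaining tickets, or None if impossible
--         if not remaining:
--             return []
--         for i in range(len(remaining)):
--             if remaining[i][0] == node:
--                 rest = dfs(remaining[i][1], remaining[:i] + remaining[i + 1:])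
--                 if rest is not None:
--                     return [remaining[i][1]] + rest
--         return None
--
--     tail = dfs("ICN", ts)
--     return ["ICN"] + tail if tail is not None else []
-- ===== Notes on version B (the rewrite author's own statement) =====
-- stated objective: alternative
-- what changed: Replaces A's breadth-first search over a queue of (path, remaining-tickets) list copies (which materialises every partial itinerary level by level) by a recursive backtracking depth-first search over the sorted tickets that returns the first completable tail, keeping only one partial path at a time.
import Mathlib
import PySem

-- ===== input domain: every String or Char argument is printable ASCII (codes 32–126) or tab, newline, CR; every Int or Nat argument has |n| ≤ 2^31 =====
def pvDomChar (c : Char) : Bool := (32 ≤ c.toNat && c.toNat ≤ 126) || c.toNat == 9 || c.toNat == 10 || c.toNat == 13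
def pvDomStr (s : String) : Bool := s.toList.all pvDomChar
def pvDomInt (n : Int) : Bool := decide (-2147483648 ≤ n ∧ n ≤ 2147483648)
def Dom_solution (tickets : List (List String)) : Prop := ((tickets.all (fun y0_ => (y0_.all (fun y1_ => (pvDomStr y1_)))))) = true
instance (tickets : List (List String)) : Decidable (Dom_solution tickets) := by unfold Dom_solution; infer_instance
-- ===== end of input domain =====

-- B replaces A's breadth-first search over queued (path, remaining-tickets) copies by a
-- backtracking depth-first search that returns the first completable tail in sorted order.
-- Note: Python A sorts its `tickets` argument in place; the equivalence proved here is about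
-- the return value only (B does not mutate its argument).


-- ===== PORT A =====
-- tk[0] and tk[1]; inside Pre_ (every inner list has length ≥ 2) the `getD ""` default is never used,
-- so these are exact for Python's tk[0] / tk[1] there.
def srcOf (tk : List String) : String := (PySem.List.pyGet? tk 0).getD ""
def dstOf (tk : List String) : String := (PySem.List.pyGet? tk 1).getD ""

-- the `for i in range(len(now_t)): if now_t[i][0] == last: valid_idx = i; break` scan
def firstMatchA (x : String) (t : List (List String)) (i : Nat) : Int :=
  if h : i < t.length then
    (if srcOf (t.getD i []) = x then (i : Int) else firstMatchA x t (i + 1))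
  else -1
termination_by t.length - i

-- the `while valid_idx < len(now_t) and now_t[valid_idx][0] == last: dq.append(...)` block;
-- t[:vi] + t[vi+1:] is t.take vi ++ t.drop (vi+1), exact since 0 ≤ vi < len t in every iteration.
def childrenA (p : List String) (x : String) (t : List (List String)) (vi : Nat) :
    List (List String × List (List String)) :=
  if h : vi < t.length ∧ srcOf (t.getD vi []) = x then
    (p ++ [dstOf (t.getD vi [])], t.take vi ++ t.drop (vi + 1)) :: childrenA p x t (vi + 1)
  else []
termination_by t.length - vi

-- measure facts used only by loopA's termination proof
theorem erase_len {α : Type} {t : List α} {i : Nat} (h : i < t.length) :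
    (t.take i ++ t.drop (i + 1)).length = t.length - 1 := by
  simp; omega

theorem childrenA_measure (p : List String) (x : String) (t : List (List String)) :
    ∀ vi, ((childrenA p x t vi).map (fun s => (s.2.length + 1).factorial)).sum
      ≤ (t.length - vi) * (t.length).factorial := by
  intro vi
  fun_induction childrenA p x t vi with
  | case1 vi h ih =>
    simp only [List.map_cons, List.sum_cons]
    rw [erase_len h.1]
    have h1 : t.length - 1 + 1 = t.length := by omega
    rw [h1]
    have h2 : (t.length - vi) * t.length.factorial
        = (t.length - (vi + 1)) * t.length.factorial + t.length.factorial := by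
      rw [show t.length - vi = (t.length - (vi + 1)) + 1 from by omega, Nat.succ_mul]
    omega
  | case2 vi h => simp

def loopA : List (List String × List (List String)) → List String
  | [] => []
  | (p, t) :: rest =>
    if t.length = 0 then p
    else
      if firstMatchA ((PySem.List.pyGet? p (-1)).getD "") t 0 = -1 then loopA rest
      else loopA (rest ++ childrenA p ((PySem.List.pyGet? p (-1)).getD "") t
        (firstMatchA ((PySem.List.pyGet? p (-1)).getD "") t 0).toNat)
termination_by q => ((q.map (fun s => (s.2.length + 1).factorial)).sum)
decreasing_by
  · have := Nat.factorial_pos (t.length + 1); simp; omega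
  · have h1 := childrenA_measure p ((PySem.List.pyGet? p (-1)).getD "") t
      (firstMatchA ((PySem.List.pyGet? p (-1)).getD "") t 0).toNat
    have h2 : (t.length - (firstMatchA ((PySem.List.pyGet? p (-1)).getD "") t 0).toNat)
        * (t.length).factorial ≤ t.length * (t.length).factorial :=
      Nat.mul_le_mul_right _ (Nat.sub_le _ _)
    have h3 : t.length * (t.length).factorial < (t.length + 1).factorial := by
      have := Nat.factorial_pos t.length
      rw [Nat.factorial_succ, Nat.succ_mul]
      omega
    have hb := lt_of_le_of_lt (le_trans h1 h2) h3
    simp only [List.map_append, List.sum_append, List.map_cons, List.sum_cons]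
    omega

def solution (tickets : List (List String)) : List String :=
  loopA [(["ICN"], PySem.List.sorted2 tickets srcOf dstOf)]

-- ===== PORT B =====
-- B's recursive `dfs(node, remaining)`; the inner `for i in range(len(remaining))` loop is scanB.
-- dfs returns the tail of destinations (Python: list or None → Option).
mutual
def dfsB (node : String) (t : List (List String)) : Option (List String) :=
  if t.isEmpty then some []
  else scanB node t 0
termination_by (2 * t.length + 1, 0)
decreasing_by
  apply Prod.Lex.left; omega
def scanB (node : String) (t : List (List String)) (i : Nat) : Option (List String) :=
  if h : i < t.length then
    if srcOf (t.getD i []) = node then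
      -- remaining[:i] + remaining[i+1:] = t.take i ++ t.drop (i+1), exact since 0 ≤ i < len t
      match dfsB (dstOf (t.getD i [])) (t.take i ++ t.drop (i + 1)) with
      | some rest => some (dstOf (t.getD i []) :: rest)
      | none => scanB node t (i + 1)
    else scanB node t (i + 1)
  else none
termination_by (2 * t.length, t.length - i)
decreasing_by
  · apply Prod.Lex.left; simp [List.length_take, List.length_drop]; omega
  · apply Prod.Lex.right'; omega; omega
  · apply Prod.Lex.right'; omega; omega
end
def solution_alt (tickets : List (List String)) : List String :=
  match dfsB "ICN" (PySem.List.sorted2 tickets srcOf dstOf) with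
  | some tail => "ICN" :: tail
  | none => []

-- ===== PRECONDITION & SPEC =====
-- Pre_ excludes exactly the inputs where Python A raises: an inner list of length < 2 makes the
-- sort key `lambda x: (x[0], x[1])` raise IndexError. A returns normally on all other inputs.
def Pre_solution (tickets : List (List String)) : Prop := ∀ tk ∈ tickets, 2 ≤ tk.length
instance (tickets : List (List String)) : Decidable (Pre_solution tickets) := by
  unfold Pre_solution; infer_instance
def pvWitness_solution : List (List String) :=
  [["ICN", "AAA"], ["AAA", "ICN"], ["ICN", "BBB"]]

def Spec_solution (tickets : List (List String)) (out : List String) : Prop := out = solution_alt tickets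
instance (tickets : List (List String)) (out : List String) : Decidable (Spec_solution tickets out) := by unfold Spec_solution; infer_instance

-- ===== CLAIM (what is proved, stated in full; the proofs are below) =====
def Claim_equal_solution : Prop := ∀ (tickets : List (List String)), Dom_solution tickets → Pre_solution tickets → Spec_solution tickets (solution tickets)

-- ===== LEMMAS AND PROOFS =====

-- ghost value of a queue state: what B's dfs would make of it
def gval (s : List String × List (List String)) : Option (List String) :=
  (dfsB ((PySem.List.pyGet? s.1 (-1)).getD "") s.2).map (fun r => s.1 ++ r)

-- B's scan order as a list of child states: every matching index from i upward
def allChildren (p : List String) (x : String) (t : List (List String)) (i : Nat) :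
    List (List String × List (List String)) :=
  if h : i < t.length then
    if srcOf (t.getD i []) = x then
      (p ++ [dstOf (t.getD i [])], t.take i ++ t.drop (i + 1)) :: allChildren p x t (i + 1)
    else allChildren p x t (i + 1)
  else []
termination_by t.length - i

-- the child states loopA enqueues for a popped state
def childrenOf (s : List String × List (List String)) :
    List (List String × List (List String)) :=
  if firstMatchA ((PySem.List.pyGet? s.1 (-1)).getD "") s.2 0 = -1 then []
  else childrenA s.1 ((PySem.List.pyGet? s.1 (-1)).getD "") s.2
    (firstMatchA ((PySem.List.pyGet? s.1 (-1)).getD "") s.2 0).toNat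

-- keyf-sortedness of sorted2's output
theorem insertBy_src_pairwise (x : List String) (ys : List (List String))
    (h : ys.Pairwise (fun a b => srcOf a ≤ srcOf b)) :
    (PySem.List.insertBy
      (fun a b => decide (srcOf a < srcOf b) || !decide (srcOf b < srcOf a) && decide (dstOf a < dstOf b))
      x ys).Pairwise (fun a b => srcOf a ≤ srcOf b) := by
  induction ys with
  | nil => simp [PySem.List.insertBy]
  | cons y ys ih =>
    rw [List.pairwise_cons] at h
    simp only [PySem.List.insertBy]
    split
    · rename_i hc
      simp only [Bool.or_eq_true, Bool.and_eq_true, decide_eq_true_eq, Bool.not_eq_eq_eq_not,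
        Bool.not_true, decide_eq_false_iff_not, not_lt] at hc
      have hxy : srcOf x ≤ srcOf y := by
        rcases hc with h1 | ⟨h1, _⟩
        · exact le_of_lt h1
        · exact h1
      refine List.Pairwise.cons ?_ (List.Pairwise.cons h.1 h.2)
      intro z hz
      rcases List.mem_cons.mp hz with rfl | hz
      · exact hxy
      · exact le_trans hxy (h.1 z hz)
    · rename_i hc
      simp only [Bool.or_eq_true, Bool.and_eq_true, decide_eq_true_eq, Bool.not_eq_eq_eq_not,
        Bool.not_true, decide_eq_false_iff_not, not_lt, not_or] at hc
      refine List.Pairwise.cons ?_ (ih h.2)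
      intro z hz
      rcases (PySem.List.insertBy_mem_iff _ x z ys).mp hz with rfl | hz
      · exact hc.1
      · exact h.1 z hz

theorem foldl_ins_pairwise (xs : List (List String)) :
    ∀ acc, acc.Pairwise (fun a b => srcOf a ≤ srcOf b) →
    (xs.foldl (fun acc x => PySem.List.insertBy
      (fun a b => decide (srcOf a < srcOf b) || !decide (srcOf b < srcOf a) && decide (dstOf a < dstOf b))
      x acc) acc).Pairwise (fun a b => srcOf a ≤ srcOf b) := by
  induction xs with
  | nil => intro acc h; simpa using h
  | cons x xs ih =>
    intro acc h
    simp only [List.foldl_cons]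
    exact ih _ (insertBy_src_pairwise x acc h)

theorem sorted2_pairwise_src (xs : List (List String)) :
    (PySem.List.sorted2 xs srcOf dstOf).Pairwise (fun a b => srcOf a ≤ srcOf b) := by
  have := foldl_ins_pairwise xs [] (by simp)
  simpa [PySem.List.sorted2] using this

theorem getD_src_mono {t : List (List String)}
    (hs : t.Pairwise (fun a b => srcOf a ≤ srcOf b)) {a b : Nat}
    (hab : a ≤ b) (hb : b < t.length) : srcOf (t.getD a []) ≤ srcOf (t.getD b []) := by
  have ha : a < t.length := lt_of_le_of_lt hab hb
  rcases eq_or_lt_of_le hab with rfl | hlt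
  · exact le_refl _
  · rw [List.getD_eq_getElem _ _ ha, List.getD_eq_getElem _ _ hb]
    exact List.pairwise_iff_getElem.mp hs a b ha hb hlt

theorem allChildren_nil {p x t} :
    ∀ i, (∀ j, i ≤ j → j < t.length → srcOf (t.getD j []) ≠ x) → allChildren p x t i = [] := by
  intro i
  fun_induction allChildren p x t i with
  | case1 i hlt hm ih => intro h; exact absurd hm (h i le_rfl hlt)
  | case2 i hlt hm ih => intro h; exact ih (fun j hj hjl => h j (by omega) hjl)
  | case3 i hlt => intro h; rfl

theorem fm_neg_iff {x t} :
    ∀ i, firstMatchA x t i = -1 ↔ (∀ j, i ≤ j → j < t.length → srcOf (t.getD j []) ≠ x) := by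
  intro i
  fun_induction firstMatchA x t i with
  | case1 i hlt hm =>
    constructor
    · intro h; exact absurd h (by omega)
    · intro h; exact absurd hm (h i le_rfl hlt)
  | case2 i hlt hm ih =>
    rw [ih]
    constructor
    · intro h j hj hjl
      rcases Nat.eq_or_lt_of_le hj with rfl | hj'
      · exact hm
      · exact h j hj' hjl
    · intro h j hj hjl; exact h j (by omega) hjl
  | case3 i hlt =>
    simp only [true_iff]
    intro j hj hjl; omega

theorem fm_pos {x t} :
    ∀ i, firstMatchA x t i ≠ -1 →
      i ≤ (firstMatchA x t i).toNat ∧ (firstMatchA x t i).toNat < t.length ∧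
      srcOf (t.getD (firstMatchA x t i).toNat []) = x ∧
      (∀ j, i ≤ j → j < (firstMatchA x t i).toNat → srcOf (t.getD j []) ≠ x) := by
  intro i
  fun_induction firstMatchA x t i with
  | case1 i hlt hm =>
    intro _
    simp only [Int.toNat_natCast]
    exact ⟨le_rfl, hlt, hm, fun j hj hjl => absurd hjl (by omega)⟩
  | case2 i hlt hm ih =>
    intro h
    obtain ⟨h1, h2, h3, h4⟩ := ih h
    refine ⟨by omega, h2, h3, ?_⟩
    intro j hj hjl
    rcases Nat.eq_or_lt_of_le hj with rfl | hj'
    · exact hm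
    · exact h4 j hj' hjl
  | case3 i hlt => intro h; exact absurd rfl h

theorem allChildren_step_nomatch (p : List String) (x : String) (t : List (List String))
    (i : Nat) (hnm : srcOf (t.getD i []) ≠ x) :
    allChildren p x t i = allChildren p x t (i + 1) := by
  by_cases hlt : i < t.length
  · conv_lhs => rw [allChildren]
    rw [dif_pos hlt, if_neg hnm]
  · conv_lhs => rw [allChildren]
    rw [dif_neg hlt]
    rw [allChildren, dif_neg (by omega)]

theorem allChildren_skip {p x t} :
    ∀ k i, i ≤ k → (∀ j, i ≤ j → j < k → srcOf (t.getD j []) ≠ x) →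
      allChildren p x t i = allChildren p x t k := by
  intro k i hik hno
  obtain ⟨d, hd⟩ : ∃ d, k - i = d := ⟨_, rfl⟩
  induction d generalizing i with
  | zero =>
    have : i = k := by omega
    rw [this]
  | succ d ih =>
    have hik' : i < k := by omega
    rw [allChildren_step_nomatch p x t i (hno i le_rfl hik')]
    exact ih (i + 1) (by omega) (fun j hj hjk => hno j (by omega) hjk) (by omega)

theorem childrenA_eq_allChildren {p x t}
    (hs : t.Pairwise (fun a b => srcOf a ≤ srcOf b)) :
    ∀ i, (∃ a, a ≤ i ∧ a < t.length ∧ srcOf (t.getD a []) = x) →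
      childrenA p x t i = allChildren p x t i := by
  intro i
  fun_induction childrenA p x t i with
  | case1 i h ih =>
    intro _
    conv_rhs => rw [allChildren]
    rw [dif_pos h.1, if_pos h.2]
    rw [ih ⟨i, by omega, h.1, h.2⟩]
  | case2 i h =>
    intro hEx
    obtain ⟨a, hai, halen, ham⟩ := hEx
    by_cases hlt : i < t.length
    · have hnm : srcOf (t.getD i []) ≠ x := fun hm => h ⟨hlt, hm⟩
      symm
      apply allChildren_nil
      intro j hj hjl hm
      apply hnm
      have h1 := getD_src_mono hs hai hlt
      have h2 := getD_src_mono hs hj hjl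
      rw [ham] at h1; rw [hm] at h2
      exact le_antisymm h2 h1
    · symm
      apply allChildren_nil
      intro j hj hjl; omega

theorem childrenOf_eq_allChildren {p : List String} {t : List (List String)}
    (hs : t.Pairwise (fun a b => srcOf a ≤ srcOf b)) :
    childrenOf (p, t) = allChildren p ((PySem.List.pyGet? p (-1)).getD "") t 0 := by
  unfold childrenOf
  by_cases hfm : firstMatchA ((PySem.List.pyGet? p (-1)).getD "") t 0 = -1
  · rw [if_pos hfm]
    symm
    apply allChildren_nil
    intro j hj hjl
    exact (fm_neg_iff 0).mp hfm j (by omega) hjl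
  · rw [if_neg hfm]
    obtain ⟨h0, hlt, hm, hpre⟩ := fm_pos 0 hfm
    rw [childrenA_eq_allChildren hs _ ⟨_, le_rfl, hlt, hm⟩]
    exact (allChildren_skip _ 0 (by omega) (fun j hj hjk => hpre j (by omega) hjk)).symm

theorem pyGet_last (p : List String) (b : String) :
    PySem.List.pyGet? (p ++ [b]) (-1) = some b := by
  simp [PySem.List.pyGet?, PySem.List.pyIdx?]

theorem scanB_map (p : List String) (x : String) (t : List (List String)) :
    ∀ i, (scanB x t i).map (fun r => p ++ r) = (allChildren p x t i).findSome? gval := by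
  intro i
  obtain ⟨d, hd⟩ : ∃ d, t.length - i = d := ⟨_, rfl⟩
  induction d generalizing i with
  | zero =>
    have hge : ¬ i < t.length := by omega
    rw [scanB, dif_neg hge, allChildren, dif_neg hge]
    rfl
  | succ d ihd =>
    have hlt : i < t.length := by omega
    rw [scanB, dif_pos hlt, allChildren, dif_pos hlt]
    by_cases hm : srcOf (t.getD i []) = x
    · rw [if_pos hm, if_pos hm, List.findSome?_cons]
      cases hdfs : dfsB (dstOf (t.getD i [])) (t.take i ++ t.drop (i + 1)) with
      | some rest =>
        have hg : gval (p ++ [dstOf (t.getD i [])], t.take i ++ t.drop (i + 1))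
            = some (p ++ dstOf (t.getD i []) :: rest) := by
          simp only [gval, pyGet_last, Option.getD_some, hdfs, Option.map_some]
          rw [List.append_assoc]
          rfl
        rw [hg]
        rfl
      | none =>
        have hg : gval (p ++ [dstOf (t.getD i [])], t.take i ++ t.drop (i + 1)) = none := by
          simp only [gval, pyGet_last, Option.getD_some, hdfs, Option.map_none]
        rw [hg]
        exact ihd (i + 1) (by omega)
    · rw [if_neg hm, if_neg hm]
      exact ihd (i + 1) (by omega)

theorem step_eq {p : List String} {t : List (List String)} (ht : t ≠ [])
    (hs : t.Pairwise (fun a b => srcOf a ≤ srcOf b)) :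
    gval (p, t) = (childrenOf (p, t)).findSome? gval := by
  have h1 : dfsB ((PySem.List.pyGet? p (-1)).getD "") t
      = scanB ((PySem.List.pyGet? p (-1)).getD "") t 0 := by
    rw [dfsB, if_neg (by simpa [List.isEmpty_iff] using ht)]
  show (dfsB ((PySem.List.pyGet? p (-1)).getD "") t).map (fun r => p ++ r) = _
  rw [h1, scanB_map p _ t 0, ← childrenOf_eq_allChildren hs]

theorem childrenA_mem {p x t c} :
    ∀ vi, c ∈ childrenA p x t vi →
      ∃ j, vi ≤ j ∧ j < t.length ∧ c = (p ++ [dstOf (t.getD j [])], t.take j ++ t.drop (j + 1)) := by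
  intro vi
  fun_induction childrenA p x t vi with
  | case1 vi h ih =>
    intro hc
    rcases List.mem_cons.mp hc with rfl | hc
    · exact ⟨vi, le_rfl, h.1, rfl⟩
    · obtain ⟨j, hj1, hj2, hj3⟩ := ih hc
      exact ⟨j, by omega, hj2, hj3⟩
  | case2 vi h => intro hc; exact absurd hc (List.not_mem_nil)

theorem childrenOf_preserve {s c} (hs : s.2.Pairwise (fun a b => srcOf a ≤ srcOf b))
    (hc : c ∈ childrenOf s) :
    c.2.Pairwise (fun a b => srcOf a ≤ srcOf b) ∧ c.2.length + 1 = s.2.length := by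
  unfold childrenOf at hc
  split at hc
  · exact absurd hc (List.not_mem_nil)
  · obtain ⟨j, hj1, hj2, rfl⟩ := childrenA_mem _ hc
    refine ⟨?_, ?_⟩
    · show (s.2.take j ++ s.2.drop (j + 1)).Pairwise _
      rw [← List.eraseIdx_eq_take_drop_succ]
      exact List.Pairwise.sublist (List.eraseIdx_sublist s.2 j) hs
    · have hlen : (s.2.take j ++ s.2.drop (j + 1)).length = s.2.length - 1 := erase_len hj2
      show (s.2.take j ++ s.2.drop (j + 1)).length + 1 = s.2.length
      omega

theorem findSome?_congr_mem {α β : Type} {l : List α} {f g : α → Option β}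
    (h : ∀ a ∈ l, f a = g a) : l.findSome? f = l.findSome? g := by
  induction l with
  | nil => rfl
  | cons a l ih =>
    simp only [List.findSome?_cons]
    rw [h a List.mem_cons_self]
    cases g a with
    | some b => rfl
    | none => exact ih (fun a ha => h a (List.mem_cons_of_mem _ ha))

theorem findSome?_flatMap {α β γ : Type} (l : List α) (f : α → List β) (g : β → Option γ) :
    (l.flatMap f).findSome? g = l.findSome? (fun a => (f a).findSome? g) := by
  induction l with
  | nil => rfl
  | cons a l ih =>
    cases h : (f a).findSome? g with
    | some b => simp [List.flatMap_cons, List.findSome?_append, h, ih]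
    | none => simp [List.flatMap_cons, List.findSome?_append, h, ih]

theorem shift (m : Nat) :
    ∀ q₁ q₂, (∀ s ∈ q₁, (s.2 : List (List String)).length = m + 1) →
      loopA (q₁ ++ q₂) = loopA (q₂ ++ q₁.flatMap childrenOf) := by
  intro q₁
  induction q₁ with
  | nil => intro q₂ h; simp
  | cons s q₁ ih =>
    intro q₂ h
    obtain ⟨p, t⟩ := s
    have hlen : t.length = m + 1 := h (p, t) (List.mem_cons_self)
    have hrest : ∀ s ∈ q₁, (s.2 : List (List String)).length = m + 1 :=
      fun s hs => h s (List.mem_cons_of_mem _ hs)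
    simp only [List.cons_append]
    rw [loopA]
    rw [if_neg (by omega)]
    by_cases hfm : firstMatchA ((PySem.List.pyGet? p (-1)).getD "") t 0 = -1
    · rw [if_pos hfm, ih q₂ hrest]
      have hch : childrenOf (p, t) = [] := by simp [childrenOf, hfm]
      rw [List.flatMap_cons, hch, List.nil_append]
    · rw [if_neg hfm]
      have hch : childrenOf (p, t)
          = childrenA p ((PySem.List.pyGet? p (-1)).getD "") t
            (firstMatchA ((PySem.List.pyGet? p (-1)).getD "") t 0).toNat := by
        simp [childrenOf, hfm]
      rw [List.append_assoc, ih _ hrest, List.flatMap_cons, hch, List.append_assoc]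

theorem level (m : Nat) :
    ∀ q, (∀ s ∈ q, (s.2 : List (List String)).Pairwise (fun a b => srcOf a ≤ srcOf b)
        ∧ s.2.length = m) →
      loopA q = (q.findSome? gval).getD [] := by
  induction m with
  | zero =>
    intro q
    induction q with
    | nil => intro _; simp [loopA]
    | cons s q ihq =>
      intro h
      obtain ⟨p, t⟩ := s
      have ht : t = [] :=
        List.length_eq_zero_iff.mp (h (p, t) (List.mem_cons_self)).2
      subst ht
      have hg : gval (p, ([] : List (List String))) = some p := by
        simp [gval, dfsB]
      simp [loopA, hg]
  | succ m ih =>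
    intro q h
    have h2 : ∀ s ∈ q, (s.2 : List (List String)).length = m + 1 := fun s hs => (h s hs).2
    have hq : loopA q = loopA (q.flatMap childrenOf) := by
      have := shift m q [] h2
      simpa using this
    rw [hq, ih _ ?cond]
    case cond =>
      intro c hc
      obtain ⟨s, hsq, hcs⟩ := List.mem_flatMap.mp hc
      have hp := childrenOf_preserve (h s hsq).1 hcs
      exact ⟨hp.1, by have := (h s hsq).2; omega⟩
    rw [findSome?_flatMap]
    have : q.findSome? (fun s => (childrenOf s).findSome? gval) = q.findSome? gval := by
      apply findSome?_congr_mem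
      intro s hs
      obtain ⟨p, t⟩ := s
      have ht : t ≠ [] := by
        have := (h (p, t) hs).2
        intro hh; rw [hh] at this; simp at this
      exact (step_eq ht (h (p, t) hs).1).symm
    rw [this]

-- ===== VERDICT (by name: the statement is the Claim_ definition above) =====
theorem solution_spec : Claim_equal_solution := by
  intro tickets _ _
  unfold Spec_solution solution solution_alt
  have hs := sorted2_pairwise_src tickets
  rw [level (PySem.List.sorted2 tickets srcOf dstOf).length _ (by
    intro s hs'
    simp at hs'
    subst hs'
    exact ⟨hs, rfl⟩)]
  simp [List.findSome?_cons, gval]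
  have hx : (PySem.List.pyGet? ["ICN"] (-1)).getD "" = "ICN" := by decide
  rw [hx]
  cases h : dfsB "ICN" (PySem.List.sorted2 tickets srcOf dstOf) <;> simp
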